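-- pv_equiv track=rewrite | github.com/LongSei/Program-In-Spare-Time | Tool for learning english/Dictionary/Source.py | optimize_list
-- ===== SOURCE A (Python) =====
-- def optimize_list(word, define):
--     isok = False
--     while isok == False:
--         remain = False
--         index1 = -1
--         index2 = -1
--         for position1 in range(0, len(word)):
--             for position2 in range(0, len(word)):
--                 if position1 == position2:
--                     continue
--                 elif word[position1] == word[position2]:
--                    remain = True
--                    index2 = position2
--                    index1 = position1
--         if index1 != -1 and index2 != -1:
--             define[index1] = define[index1] + ', ' + define[index2]
--             define.pop(index2)
--             word.pop(index2)
--         if remain == True: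
--             isok = False
--         else:
--             isok = True
--     return [word, define]
-- ===== SOURCE B (Python) =====
-- def optimize_list(word, define):
--     # index of each word's last occurrence
--     last = {}
--     for i, w in enumerate(word):
--         last[w] = i
--     # append each earlier duplicate's definition onto its word's last definition
--     for i in range(len(word) - 1, -1, -1):
--         j = last[word[i]]
--         if j != i:
--             define[j] = define[j] + ', ' + define[i]
--     # drop the earlier duplicate entries, keeping positions stable
--     for i in range(len(word) - 1, -1, -1):
--         if last[word[i]] != i:
--             word.pop(i)
--             define.pop(i)
--     return [word, define]
-- ===== Notes on version B (the rewrite author's own statement) =====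
-- stated objective: faster
-- what changed: A repeatedly rescans all index pairs in a while loop, merging one duplicate per pass; B builds a word-to-last-occurrence dict once, then in one descending pass appends each earlier duplicate's definition onto its last occurrence and in a second descending pass pops the duplicate entries; Pre_ excludes only the inputs where A raises IndexError (a duplicated word at a position with no parallel definition).
import Mathlib
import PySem

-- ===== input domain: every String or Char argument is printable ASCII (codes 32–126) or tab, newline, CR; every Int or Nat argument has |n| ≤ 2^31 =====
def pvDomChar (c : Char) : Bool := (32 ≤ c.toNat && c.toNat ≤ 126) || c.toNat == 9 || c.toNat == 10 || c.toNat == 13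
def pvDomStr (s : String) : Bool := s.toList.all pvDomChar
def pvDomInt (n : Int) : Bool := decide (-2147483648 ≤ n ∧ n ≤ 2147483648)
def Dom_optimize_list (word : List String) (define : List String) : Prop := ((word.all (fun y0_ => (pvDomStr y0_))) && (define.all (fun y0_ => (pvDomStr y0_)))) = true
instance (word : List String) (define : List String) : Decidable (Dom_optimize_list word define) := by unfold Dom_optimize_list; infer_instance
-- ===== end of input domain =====

-- B replaces A's repeated quadratic rescans (one merge per pass of a while loop) by a last-occurrence
-- hashmap and three linear passes (faster); both A and B mutate their arguments in place and the
-- equivalence proved here is about the RETURN value only (the final lists are the returned ones).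

-- ===== PORT A =====
-- the nested 'for position1/position2' scan: state (remain, index1, index2), initially (False, -1, -1)
def scanA (word : List String) : Bool × Int × Int :=
  (PySem.List.pyRange 0 (word.length : Int) 1).foldl
    (fun st p1 =>
      (PySem.List.pyRange 0 (word.length : Int) 1).foldl
        (fun st2 p2 =>
          if p1 == p2 then st2
          else if PySem.List.pyGet? word p1 == PySem.List.pyGet? word p2 then (true, p1, p2)
          else st2)
        st)
    st0A
where st0A : Bool × Int × Int := (false, -1, -1)

-- the 'while isok == False' loop as recursion: remain is true exactly when index1 ≠ -1, so the
-- loop runs again exactly after a successful merge; the '[word, define]' fallbacks sit where the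
-- Python raises IndexError (define[index1] / define.pop(index2) out of range) — outside Pre_.
def optimize_list (word : List String) (define : List String) : List (List String) :=
  let s := scanA word
  if s.2.1 != -1 && s.2.2 != -1 then
    match PySem.List.pyGet? define s.2.1, PySem.List.pyGet? define s.2.2 with
    | some d1, some d2 =>
      -- define[index1] = define[index1] + ', ' + define[index2]  (index in range here: pyGet? returned some)
      let define2 := PySem.List.pySetD define s.2.1 (d1 ++ ", " ++ d2)
      match PySem.List.pop? define2 s.2.2, hw : PySem.List.pop? word s.2.2 with
      | some pd, some pw => optimize_list pw.2 pd.2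
      | _, _ => [word, define]
    | _, _ => [word, define]
  else [word, define]
termination_by word.length
decreasing_by
  have := PySem.List.length_of_pop?_eq_some word hw
  omega

-- ===== PORT B =====
-- last = {}; for i, w in enumerate(word): last[w] = i
def lastDict (word : List String) : PySem.Dict String Int :=
  (PySem.List.enumerate word).foldl (fun d p => PySem.Dict.insert d p.2 p.1) PySem.Dict.empty

def optimize_list_alt (word : List String) (define : List String) : List (List String) :=
  let last := lastDict word
  -- for i in range(len(word)-1, -1, -1): j = last[word[i]]; if j != i: define[j] = define[j] + ', ' + define[i]
  let define2 :=
    (PySem.List.pyRange ((word.length : Int) - 1) (-1) (-1)).foldl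
      (fun df i =>
        match PySem.List.pyGet? word i with
        | none => df                      -- unreachable: i ∈ range(len(word))
        | some w =>
          match PySem.Dict.get? last w with
          | none => df                    -- unreachable: every word of the list is a key of last
          | some j =>
            if j != i then
              match PySem.List.pyGet? df j with
              | none => df                -- IndexError in the Python here: outside Pre_
              | some dj =>
                match PySem.List.pyGet? df i with
                | none => df              -- IndexError in the Python here: outside Pre_
                | some di => PySem.List.pySetD df j (dj ++ ", " ++ di)
            else df)
      define
  -- for i in range(len(word)-1, -1, -1): if last[word[i]] != i: word.pop(i); define.pop(i)
  let wd :=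
    (PySem.List.pyRange ((word.length : Int) - 1) (-1) (-1)).foldl
      (fun (wd : List String × List String) i =>
        match PySem.List.pyGet? wd.1 i with
        | none => wd                      -- unreachable
        | some w =>
          match PySem.Dict.get? last w with
          | none => wd                    -- unreachable
          | some j =>
            if j != i then
              match PySem.List.pop? wd.1 i with
              | none => wd                -- IndexError in the Python here: outside Pre_
              | some pw =>
                match PySem.List.pop? wd.2 i with
                | none => wd              -- IndexError in the Python here: outside Pre_
                | some pd => (pw.2, pd.2)
            else wd)
      (word, define2)
  [wd.1, wd.2]

-- ===== PRECONDITION & SPEC =====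
-- Pre_ excludes exactly the inputs on which A raises IndexError: a word that has a duplicate
-- but sits at a position with no parallel definition (define shorter than word there).
def Pre_optimize_list (word : List String) (define : List String) : Prop :=
  ∀ i < word.length, ∀ j < word.length, i ≠ j → word[i]? = word[j]? → i < define.length
instance (word : List String) (define : List String) : Decidable (Pre_optimize_list word define) := by
  unfold Pre_optimize_list; infer_instance

def pvWitness_optimize_list : List String × List String := (["a", "b", "a"], ["1", "2", "3"])

def Spec_optimize_list (word : List String) (define : List String) (out : List (List String)) : Prop := out = optimize_list_alt word define
instance (word : List String) (define : List String) (out : List (List String)) : Decidable (Spec_optimize_list word define out) := by unfold Spec_optimize_list; infer_instance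

-- ===== CLAIM (what is proved, stated in full; the proofs are below) =====
def Claim_equal_optimize_list : Prop := ∀ (word : List String) (define : List String), Dom_optimize_list word define → Pre_optimize_list word define → Spec_optimize_list word define (optimize_list word define)

-- ===== LEMMAS AND PROOFS =====

-- ---- the common closed-form description both programs are proved equal to ----
-- isL word i: position i holds the last occurrence of its word
def isL (word : List String) (i : Nat) : Bool :=
  decide (∀ k < word.length, i < k → word.getD k "" ≠ word.getD i "")

def keepIdx (word : List String) : List Nat := (List.range word.length).filter (isL word)

-- the merged definition at a kept position q: its own def, then earlier occurrences' defs, latest first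
def mrg (word define : List String) (q : Nat) : String :=
  (((List.range q).filter (fun i => word.getD i "" == word.getD q "")).reverse).foldl
    (fun s i => s ++ ", " ++ define.getD i "") (define.getD q "")

def Gw (word : List String) : List String := (keepIdx word).map (fun i => word.getD i "")

def Gd (word define : List String) : List String :=
  ((keepIdx word).filter (fun i => decide (i < define.length))).map (mrg word define)
    ++ define.drop word.length

def Gg (word define : List String) : List (List String) := [Gw word, Gd word define]

-- ---- generic list lemmas ----
theorem pvLastwin {α β : Type} (l : List α) (P : α → Bool) (f : α → β) (st0 : β) :
    l.foldl (fun st x => if P x then f x else st) st0 = ((l.filter P).map f).getLastD st0 := by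
  induction l generalizing st0 with
  | nil => rfl
  | cons x xs ih =>
    cases hP : P x
    · simp [hP, ih]
    · simp only [List.foldl_cons, List.filter_cons, hP, if_true, List.map_cons]
      rw [ih, List.getLastD_cons]

theorem pvGetLastD_map {α β : Type} (l : List α) (f : α → β) (hl : l ≠ []) (d : β) (d0 : α) :
    (l.map f).getLastD d = f (l.getLastD d0) := by
  rcases l.eq_nil_or_concat with rfl | ⟨ys, y, rfl⟩
  · exact absurd rfl hl
  · simp

theorem pvMem_le_getLastD (l : List Nat) (h : l.Pairwise (· < ·)) (y : Nat) (hy : y ∈ l) :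
    y ≤ l.getLastD 0 := by
  rcases l.eq_nil_or_concat with rfl | ⟨ys, z, rfl⟩
  · simp at hy
  · rw [List.concat_eq_append] at hy h ⊢
    rw [List.getLastD_concat]
    rw [List.pairwise_append] at h
    rcases List.mem_append.1 hy with h1 | h2
    · exact le_of_lt (h.2.2 y h1 z (by simp))
    · simp at h2; omega

theorem pvGetLastD_mem {α : Type} (l : List α) (hl : l ≠ []) (d : α) : l.getLastD d ∈ l := by
  rcases l.eq_nil_or_concat with rfl | ⟨ys, y, rfl⟩
  · exact absurd rfl hl
  · simp

theorem pvGetElem?_eraseIdx {α : Type} (l : List α) (s i : Nat) :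
    (l.eraseIdx s)[i]? = if i < s then l[i]? else l[i + 1]? := List.getElem?_eraseIdx

-- ---- A's double scan: picks the largest duplicated index M and the largest other occurrence S ----
def cndP (word : List String) (i j : Nat) : Bool :=
  (!((i : Int) == (j : Int))) && (word[i]? == word[j]?)

def candsP (word : List String) (i : Nat) : List Nat :=
  (List.range word.length).filter (cndP word i)

def dupsP (word : List String) : List Nat :=
  (List.range word.length).filter (fun i => !(candsP word i).isEmpty)

def MiP (word : List String) : Nat := (dupsP word).getLastD 0
def SiP (word : List String) : Nat := (candsP word (MiP word)).getLastD 0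

theorem scanA_eq (word : List String) :
    scanA word =
      if (dupsP word).isEmpty then (false, -1, -1)
      else (true, (MiP word : Int), (SiP word : Int)) := by
  unfold scanA scanA.st0A
  simp only [PySem.List.pyRange_zero_nat, List.foldl_map]
  have hbody : ∀ (st : Bool × Int × Int) (i : Nat),
      List.foldl
        (fun x (j : Nat) =>
          if ((i : Int) == (j : Int)) = true then x
          else
            if (PySem.List.pyGet? word (i : Int) == PySem.List.pyGet? word (j : Int)) = true then
              (true, (i : Int), (j : Int))
            else x)
        st (List.range word.length)
      = if !(candsP word i).isEmpty then (true, (i : Int), ((candsP word i).getLastD 0 : Int)) else st := by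
    intro st i
    have h1 : (fun (x : Bool × Int × Int) (j : Nat) =>
        if ((i : Int) == (j : Int)) = true then x
        else
          if (PySem.List.pyGet? word (i : Int) == PySem.List.pyGet? word (j : Int)) = true then
            (true, (i : Int), (j : Int))
          else x)
        = fun x j => if cndP word i j then (true, (i : Int), (j : Int)) else x := by
      funext x j
      unfold cndP
      cases h1 : ((i : Int) == (j : Int)) <;>
        cases h2 : (word[i]? == word[j]?) <;>
          simp_all [PySem.List.pyGet?_natCast]
    rw [h1, pvLastwin]
    rw [show List.filter (cndP word i) (List.range word.length) = candsP word i from rfl]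
    cases hE : (candsP word i).isEmpty
    · rw [pvGetLastD_map _ _ (by simpa [List.isEmpty_iff] using hE) _ 0]
      simp
    · rw [List.isEmpty_iff] at hE
      simp [hE]
  have h2 : (fun (x : Bool × Int × Int) (y : Nat) =>
      List.foldl
        (fun x_1 (y_1 : Nat) =>
          if ((y : Int) == (y_1 : Int)) = true then x_1
          else
            if (PySem.List.pyGet? word (y : Int) == PySem.List.pyGet? word (y_1 : Int)) = true then
              (true, (y : Int), (y_1 : Int))
            else x_1)
        x (List.range word.length))
      = fun st i => if !(candsP word i).isEmpty then (true, (i : Int), ((candsP word i).getLastD 0 : Int)) else st := by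
    funext st i; exact hbody st i
  rw [h2, pvLastwin]
  rw [show List.filter (fun i => !(candsP word i).isEmpty) (List.range word.length) = dupsP word from rfl]
  cases hD : (dupsP word).isEmpty
  · rw [pvGetLastD_map _ _ (by simpa [List.isEmpty_iff] using hD) _ 0]
    simp [MiP, SiP]
  · rw [List.isEmpty_iff] at hD
    simp [hD]

theorem cnd_mem_iff (word : List String) (i j : Nat) :
    j ∈ candsP word i ↔ j < word.length ∧ i ≠ j ∧ word[i]? = word[j]? := by
  simp [candsP, cndP, List.mem_filter]

theorem dups_empty_nodup (word : List String) (h : dupsP word = []) : word.Nodup := by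
  have hall : ∀ i < word.length, (candsP word i).isEmpty := by
    intro i hi
    by_contra hne
    have : i ∈ dupsP word := by
      rw [List.isEmpty_iff] at hne
      simp [dupsP, List.mem_filter, List.mem_range, hi, hne]
    simp [h] at this
  rw [List.nodup_iff_injective_get]
  rintro ⟨i, hi⟩ ⟨j, hj⟩ hij
  by_contra hne
  have hji : j ∈ candsP word i := by
    rw [cnd_mem_iff]
    refine ⟨hj, by simpa using hne, ?_⟩
    simp only [List.getElem?_eq_getElem, hi, hj]
    simpa [List.get_eq_getElem] using hij
  have := hall i hi
  rw [List.isEmpty_iff] at this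
  simp [this] at hji

theorem Mi_facts (word : List String) (h : dupsP word ≠ []) :
    MiP word < word.length ∧ candsP word (MiP word) ≠ [] ∧
      ∀ j, MiP word < j → j < word.length → (candsP word j).isEmpty := by
  have hmem : MiP word ∈ dupsP word := pvGetLastD_mem _ h 0
  have hpair : (dupsP word).Pairwise (· < ·) := List.Pairwise.filter _ (List.pairwise_lt_range)
  simp only [dupsP, List.mem_filter, List.mem_range] at hmem
  refine ⟨hmem.1, by simpa [List.isEmpty_iff] using hmem.2, ?_⟩
  intro j hMj hjn
  by_contra hne
  have hj : j ∈ dupsP word := by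
    rw [List.isEmpty_iff] at hne
    simp [dupsP, List.mem_filter, List.mem_range, hjn, hne]
  have := pvMem_le_getLastD _ hpair j hj
  unfold MiP at hMj
  omega

theorem Si_facts (word : List String) (h : dupsP word ≠ []) :
    SiP word ∈ candsP word (MiP word) ∧ ∀ j ∈ candsP word (MiP word), j ≤ SiP word := by
  have hne : candsP word (MiP word) ≠ [] := (Mi_facts word h).2.1
  have hpair : (candsP word (MiP word)).Pairwise (· < ·) :=
    List.Pairwise.filter _ (List.pairwise_lt_range)
  exact ⟨pvGetLastD_mem _ hne 0, fun j hj => pvMem_le_getLastD _ hpair j hj⟩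

theorem Si_lt_Mi (word : List String) (h : dupsP word ≠ []) : SiP word < MiP word := by
  have hS := (Si_facts word h).1
  rw [cnd_mem_iff] at hS
  rcases hS with ⟨hSn, hMS, hw⟩
  rcases Nat.lt_trichotomy (SiP word) (MiP word) with hlt | heq | hgt
  · exact hlt
  · exact absurd heq.symm hMS
  · exfalso
    have hM : MiP word ∈ candsP word (SiP word) := by
      rw [cnd_mem_iff]
      exact ⟨(Mi_facts word h).1, fun e => hMS e.symm, hw.symm⟩
    have hemp := (Mi_facts word h).2.2 (SiP word) hgt hSn
    rw [List.isEmpty_iff] at hemp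
    simp [hemp] at hM

theorem Mi_lt_define (word define : List String) (hd : dupsP word ≠ [])
    (hpre : Pre_optimize_list word define) :
    MiP word < define.length ∧ SiP word < define.length := by
  have hM := (Mi_facts word hd).1
  have hS := (Si_facts word hd).1
  rw [cnd_mem_iff] at hS
  rcases hS with ⟨hSn, hMS, hw⟩
  exact ⟨hpre _ hM _ hSn hMS hw, hpre _ hSn _ hM (fun e => hMS e.symm) hw.symm⟩

theorem pre_preserved (word define : List String) (hd : dupsP word ≠ [])
    (hpre : Pre_optimize_list word define) :
    Pre_optimize_list (word.eraseIdx (SiP word))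
      ((define.set (MiP word)
          (define.getD (MiP word) "" ++ ", " ++ define.getD (SiP word) "")).eraseIdx (SiP word)) := by
  have hMn : MiP word < word.length := (Mi_facts word hd).1
  have hS := (Si_facts word hd).1
  rw [cnd_mem_iff] at hS
  obtain ⟨hSn, hMS, hw⟩ := hS
  obtain ⟨hMm, hSm⟩ := Mi_lt_define word define hd hpre
  intro i hi j hj hij heq
  have hlw : (word.eraseIdx (SiP word)).length = word.length - 1 := by
    rw [List.length_eraseIdx]
    simp [hSn]
  have hld : (((define.set (MiP word) (define.getD (MiP word) "" ++ ", " ++ define.getD (SiP word) "")).eraseIdx (SiP word))).length = define.length - 1 := by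
    rw [List.length_eraseIdx]
    simp [List.length_set, hSm]
  rw [hld]
  rw [pvGetElem?_eraseIdx, pvGetElem?_eraseIdx] at heq
  rw [hlw] at hi hj
  by_cases h1 : i < SiP word <;> by_cases h2 : j < SiP word
  · rw [if_pos h1, if_pos h2] at heq
    have := hpre i (by omega) j (by omega) hij heq
    omega
  · rw [if_pos h1, if_neg h2] at heq
    have := hpre i (by omega) (j + 1) (by omega) (by omega) heq
    omega
  · rw [if_neg h1, if_pos h2] at heq
    have := hpre (i + 1) (by omega) j (by omega) (by omega) heq
    omega
  · rw [if_neg h1, if_neg h2] at heq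
    have := hpre (i + 1) (by omega) (j + 1) (by omega) (by omega) heq
    omega

-- ---- infrastructure ----
theorem pvGetD_eraseIdx {α : Type} (l : List α) (s i : Nat) (d : α) :
    (l.eraseIdx s).getD i d = if i < s then l.getD i d else l.getD (i + 1) d := by
  rw [List.getD_eq_getElem?_getD, List.getElem?_eraseIdx]
  split_ifs <;> rw [List.getD_eq_getElem?_getD]

theorem pvGetD_set {α : Type} (l : List α) (j i : Nat) (v d : α) (hj : j < l.length) :
    (l.set j v).getD i d = if i = j then v else l.getD i d := by
  rw [List.getD_eq_getElem?_getD]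
  by_cases h : i = j
  · subst h
    rw [List.getElem?_set_self hj]
    simp
  · rw [List.getElem?_set_ne (fun e => h e.symm), if_neg h, List.getD_eq_getElem?_getD]

theorem pvMapGetD_take {α : Type} (l : List α) (d : α) (k : Nat) (hk : k ≤ l.length) :
    (List.range k).map (fun i => l.getD i d) = l.take k := by
  apply List.ext_getElem
  · simp [hk]
  · intro i h1 h2
    simp only [List.getElem_map, List.getElem_range, List.getElem_take]
    rw [List.getD_eq_getElem l d (by simp at h1; omega)]

theorem pvRangeFilterLt (n m : Nat) :
    (List.range n).filter (fun i => decide (i < m)) = List.range (min n m) := by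
  induction n with
  | zero => simp
  | succ n ih =>
    rw [List.range_succ, List.filter_append, ih]
    by_cases h : n < m
    · have : min (n+1) m = min n m + 1 := by omega
      rw [this, List.range_succ]
      have : min n m = n := by omega
      simp [h, this]
    · have h1 : min (n+1) m = min n m := by omega
      simp [h, h1]

-- split off the head element t of a 'filter (t ≤ i && Q i)' over an initial range
theorem pvFilterSplit (N t : Nat) (Q : Nat → Bool) (h : t < N) :
    (List.range N).filter (fun i => decide (t ≤ i) && Q i)
      = (if Q t then [t] else []) ++ (List.range N).filter (fun i => decide (t + 1 ≤ i) && Q i) := by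
  have hdec : List.range N = List.range (t+1) ++ (List.range (N-t-1)).map ((t+1) + ·) := by
    rw [← List.range_add]
    congr 1
    omega
  rw [hdec, List.filter_append, List.filter_append]
  have h1 : (List.range (t+1)).filter (fun i => decide (t ≤ i) && Q i)
      = (if Q t then [t] else []) := by
    rw [List.range_succ, List.filter_append]
    have hz : (List.range t).filter (fun i => decide (t ≤ i) && Q i) = [] := by
      apply List.filter_eq_nil_iff.mpr
      intro i hi
      rw [List.mem_range] at hi
      simp
      omega
    rw [hz]
    cases hQ : Q t <;> simp [hQ]
  have h2 : (List.range (t+1)).filter (fun i => decide (t + 1 ≤ i) && Q i) = [] := by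
    apply List.filter_eq_nil_iff.mpr
    intro i hi
    rw [List.mem_range] at hi
    simp
    omega
  rw [h1, h2]
  simp only [List.nil_append]
  congr 1
  apply List.filter_congr
  intro i hi
  rw [List.mem_map] at hi
  obtain ⟨k, _, rfl⟩ := hi
  have e1 : t ≤ t + 1 + k := by omega
  have e2 : t + 1 ≤ t + 1 + k := by omega
  simp [e1, e2]

-- when t itself fails Q, the two filters agree
theorem pvFilterShift (N t : Nat) (Q : Nat → Bool) (hQ : Q t = false) :
    (List.range N).filter (fun i => decide (t ≤ i) && Q i)
      = (List.range N).filter (fun i => decide (t + 1 ≤ i) && Q i) := by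
  apply List.filter_congr
  intro i _
  by_cases hi : i = t
  · subst hi; simp [hQ]
  · by_cases h1 : t ≤ i <;> by_cases h2 : t + 1 ≤ i <;> simp [h1, h2] <;> omega
theorem pvNodup_getD_ne (word : List String) (h : word.Nodup) (i k : Nat)
    (hi : i < word.length) (hk : k < word.length) (hik : i ≠ k) :
    word.getD i "" ≠ word.getD k "" := by
  rw [List.getD_eq_getElem _ _ hi, List.getD_eq_getElem _ _ hk]
  intro heq
  have := List.nodup_iff_injective_get.mp h (a₁ := ⟨i, hi⟩) (a₂ := ⟨k, hk⟩)
    (by simpa [List.get_eq_getElem] using heq)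
  exact hik (congrArg Fin.val this)

theorem Gg_nodup (word define : List String) (h : word.Nodup) :
    Gg word define = [word, define] := by
  have hkeep : keepIdx word = List.range word.length := by
    unfold keepIdx
    apply List.filter_eq_self.mpr
    intro i hi
    rw [List.mem_range] at hi
    unfold isL
    apply decide_eq_true
    intro k hk hik
    exact (pvNodup_getD_ne word h k i hk hi (by omega)).symm ∘ Eq.symm
  have hmrg : ∀ q < word.length, mrg word define q = define.getD q "" := by
    intro q hq
    unfold mrg
    have hf : (List.range q).filter (fun i => word.getD i "" == word.getD q "") = [] := by
      apply List.filter_eq_nil_iff.mpr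
      intro i hi
      rw [List.mem_range] at hi
      simp only [beq_iff_eq]
      exact pvNodup_getD_ne word h i q (by omega) hq (by omega)
    rw [hf]
    rfl
  unfold Gg Gw Gd
  rw [hkeep, pvMapGetD_take word "" word.length le_rfl, List.take_length]
  rw [pvRangeFilterLt]
  congr 2
  have hcg : (List.range (min word.length define.length)).map (mrg word define)
      = (List.range (min word.length define.length)).map (fun i => define.getD i "") := by
    apply List.map_congr_left
    intro q hq
    rw [List.mem_range] at hq
    exact hmrg q (by omega)
  rw [hcg, pvMapGetD_take define "" _ (by omega)]
  by_cases hnm : word.length ≤ define.length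
  · rw [min_eq_left hnm]
    exact List.take_append_drop _ _
  · rw [min_eq_right (by omega), List.take_of_length_le (by omega),
      List.drop_eq_nil_of_le (by omega), List.append_nil]
-- ---- the last-occurrence dictionary ----
def lastOcc? (word : List String) (w : String) : Option Nat :=
  ((List.range word.length).filter (fun i => word.getD i "" == w)).getLast?

theorem pvGetLast?_of_ne_nil {α : Type} (l : List α) (h : l ≠ []) (d : α) :
    l.getLast? = some (l.getLastD d) := by
  rcases l.eq_nil_or_concat with rfl | ⟨ys, y, rfl⟩
  · exact absurd rfl h
  · simp

theorem lastDict_append (l : List String) (x : String) :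
    lastDict (l ++ [x]) = (lastDict l).insert x (l.length : Int) := by
  unfold lastDict
  rw [PySem.List.enumerate_append, List.foldl_append]
  simp [PySem.List.enumerate_cons, PySem.List.enumerate_nil]

theorem lastDict_get? (word : List String) (w : String) :
    (lastDict word).get? w = (lastOcc? word w).map (fun n => (n : Int)) := by
  induction word using List.reverseRecOn with
  | nil => rfl
  | append_singleton l x ih =>
    rw [lastDict_append]
    unfold lastOcc?
    rw [List.length_append, List.length_singleton, List.range_succ, List.filter_append]
    have htail : List.filter (fun i => (l ++ [x]).getD i "" == w) [l.length]
        = if x == w then [l.length] else [] := by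
      have hx : (l ++ [x]).getD l.length "" = x := by
        rw [List.getD_eq_getElem?_getD, List.getElem?_append_right le_rfl]
        simp
      simp only [List.filter, hx]
      cases h : (x == w) <;> simp [h]
    have hhead : List.filter (fun i => (l ++ [x]).getD i "" == w) (List.range l.length)
        = List.filter (fun i => l.getD i "" == w) (List.range l.length) := by
      apply List.filter_congr
      intro i hi
      rw [List.mem_range] at hi
      rw [List.getD_append l [x] "" i hi]
    rw [hhead, htail]
    by_cases hxw : x = w
    · subst hxw
      rw [PySem.Dict.get?_insert_self]
      simp
    · rw [PySem.Dict.get?_insert_of_ne (hne := fun e => hxw e.symm), ih,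
        if_neg (by simp [hxw]), List.append_nil]
      rfl

theorem lastOcc_spec (word : List String) (i : Nat) (hi : i < word.length) :
    ∃ j, lastOcc? word (word.getD i "") = some j ∧ i ≤ j ∧ j < word.length ∧
      word.getD j "" = word.getD i "" ∧
      (∀ k, j < k → k < word.length → word.getD k "" ≠ word.getD i "") := by
  set L := (List.range word.length).filter (fun p => word.getD p "" == word.getD i "") with hL
  have hiL : i ∈ L := by
    rw [hL, List.mem_filter, List.mem_range]
    exact ⟨hi, by simp⟩
  have hne : L ≠ [] := List.ne_nil_of_mem hiL
  have hpair : L.Pairwise (· < ·) := List.Pairwise.filter _ (List.pairwise_lt_range)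
  refine ⟨L.getLastD 0, pvGetLast?_of_ne_nil L hne 0, pvMem_le_getLastD L hpair i hiL, ?_, ?_, ?_⟩
  · have := pvGetLastD_mem L hne 0
    rw [hL, List.mem_filter, List.mem_range] at this
    exact this.1
  · have := pvGetLastD_mem L hne 0
    rw [hL, List.mem_filter, List.mem_range] at this
    exact of_decide_eq_true this.2
  · intro k hk hkn heq
    have hkL : k ∈ L := by
      rw [hL, List.mem_filter, List.mem_range]
      refine ⟨hkn, ?_⟩
      apply beq_iff_eq.mpr
      exact heq
    have := pvMem_le_getLastD L hpair k hkL
    omega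

theorem isL_iff_lastOcc (word : List String) (i : Nat) (hi : i < word.length) :
    isL word i = true ↔ lastOcc? word (word.getD i "") = some i := by
  obtain ⟨j, hj, hij, hjn, hjv, hmax⟩ := lastOcc_spec word i hi
  constructor
  · intro h
    rw [hj]
    have h' := of_decide_eq_true h
    rcases Nat.eq_or_lt_of_le hij with rfl | hlt
    · rfl
    · exact absurd hjv (h' j hjn hlt)
  · intro h
    rw [hj] at h
    have : j = i := Option.some_inj.mp h
    subst this
    apply decide_eq_true
    intro k hk hik
    exact hmax k hik hk
-- ---- the merge pass (loop 2) ----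
-- partial merge at q: q's definition plus defs of q's earlier occurrences in [t, q), latest first
def pm (word define : List String) (t q : Nat) : String :=
  (((List.range q).filter (fun i => decide (t ≤ i) && (word.getD i "" == word.getD q ""))).reverse).foldl
    (fun s i => s ++ ", " ++ define.getD i "") (define.getD q "")

-- the define list after the merge pass has processed the indices ≥ t
def St (word define : List String) (t : Nat) : List String :=
  (List.range define.length).map (fun q =>
    if q < word.length ∧ isL word q = true then pm word define t q else define.getD q "")

theorem pvEraseFront {α : Type} (u : List α) (x : α) (R : List α) (s : Nat) (hs : u.length = s) :
    (u ++ x :: R).eraseIdx s = u ++ R := by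
  subst hs
  rw [List.eraseIdx_append_of_length_le le_rfl, Nat.sub_self, List.eraseIdx_cons_zero]

theorem mrg_eq_pm (word define : List String) (q : Nat) : mrg word define q = pm word define 0 q := by
  unfold mrg pm
  have h : (List.range q).filter (fun i => word.getD i "" == word.getD q "")
      = (List.range q).filter (fun i => decide (0 ≤ i) && (word.getD i "" == word.getD q "")) := by
    apply List.filter_congr
    intro i _
    simp
  rw [h]

theorem St_top (word define : List String) : St word define word.length = define := by
  unfold St
  have h : ∀ q ∈ List.range define.length,
      (if q < word.length ∧ isL word q = true then pm word define word.length q else define.getD q "")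
        = define.getD q "" := by
    intro q _
    split_ifs with hq
    · unfold pm
      have hf : (List.range q).filter
          (fun i => decide (word.length ≤ i) && (word.getD i "" == word.getD q "")) = [] := by
        apply List.filter_eq_nil_iff.mpr
        intro i hi
        rw [List.mem_range] at hi
        have : ¬ (word.length ≤ i) := by omega
        simp [this]
      rw [hf]
      rfl
    · rfl
  rw [List.map_congr_left h]
  simpa using pvMapGetD_take define "" define.length le_rfl

-- the q-th entry of St
theorem St_getElem? (word define : List String) (t q : Nat) :
    (St word define t)[q]? =
      if q < define.length then
        some (if q < word.length ∧ isL word q = true then pm word define t q else define.getD q "")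
      else none := by
  unfold St
  by_cases h : q < define.length
  · rw [List.getElem?_map, List.getElem?_range h]
    simp [h]
  · rw [List.getElem?_eq_none (by simp; omega)]
    simp [h]

theorem length_St (word define : List String) (t : Nat) : (St word define t).length = define.length := by
  unfold St; simp

-- the merge pass body, named for the proofs (definitionally the port's lambda)
def body2 (word : List String) (df : List String) (i : Int) : List String :=
  match PySem.List.pyGet? word i with
  | none => df
  | some w =>
    match PySem.Dict.get? (lastDict word) w with
    | none => df
    | some j =>
      if j != i then
        match PySem.List.pyGet? df j with
        | none => df
        | some dj =>
          match PySem.List.pyGet? df i with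
          | none => df
          | some di => PySem.List.pySetD df j (dj ++ ", " ++ di)
      else df

-- one step of the merge pass
theorem loop2_step (word define : List String) (hpre : Pre_optimize_list word define)
    (t : Nat) (ht : t < word.length) :
    body2 word (St word define (t + 1)) (t : Int) = St word define t := by
  unfold body2
  have hw : PySem.List.pyGet? word (t : Int) = some (word.getD t "") := by
    rw [PySem.List.pyGet?_natCast, List.getElem?_eq_getElem ht, List.getD_eq_getElem _ _ ht]
  obtain ⟨j, hj, htj, hjn, hjv, hmax⟩ := lastOcc_spec word t ht
  have hdict : PySem.Dict.get? (lastDict word) (word.getD t "") = some (j : Int) := by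
    rw [lastDict_get?, hj]; rfl
  rw [hw]
  simp only []
  rw [hdict]
  simp only []
  by_cases hL : isL word t = true
  · -- t is its word's last occurrence: j = t, no write; St (t+1) = St t
    have hjt : j = t := by
      have := (isL_iff_lastOcc word t ht).mp hL
      rw [hj] at this
      exact Option.some_inj.mp this
    subst hjt
    rw [if_neg (by simp)]
    unfold St
    apply List.map_congr_left
    intro q hq
    rw [List.mem_range] at hq
    split_ifs with hcond
    · unfold pm
      congr 2
      apply List.filter_congr
      intro i hi
      rw [List.mem_range] at hi
      by_cases hit : i = j
      · subst hit
        have hQ : (word.getD i "" == word.getD q "") = false := by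
          -- q > i = t is a later occurrence of word[t], contradicting isL t
          have hne : word.getD q "" ≠ word.getD i "" := of_decide_eq_true hL q hcond.1 hi
          exact beq_eq_false_iff_ne.mpr (fun heq => hne heq.symm)
        rw [hQ, Bool.and_false, Bool.and_false]
      · have e1 : (decide (i ≤ i) : Bool) = true := by simp
        by_cases h1 : j ≤ i <;> by_cases h2 : j + 1 ≤ i <;>
          first
          | (simp [h1, h2]; omega)
          | (rw [show (decide (j ≤ i) : Bool) = decide (j + 1 ≤ i) by
               by_cases hx : j ≤ i <;> by_cases hy : j + 1 ≤ i <;> simp [hx, hy] <;> omega])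
    · rfl
  · -- t is a duplicate: its def is appended onto the last occurrence j
    have hjt : j ≠ t := by
      intro e
      exact hL ((isL_iff_lastOcc word t ht).mpr (by rw [hj, e]))
    have htj' : t < j := by omega
    have hLj : isL word j = true := by
      apply (isL_iff_lastOcc word j hjn).mpr
      rw [hjv, hj]
    -- Pre_: both t and j carry definitions
    have htm : t < define.length := by
      apply hpre t ht j hjn (by omega)
      rw [List.getElem?_eq_getElem ht, List.getElem?_eq_getElem hjn]
      rw [← List.getD_eq_getElem word "" ht, ← List.getD_eq_getElem word "" hjn, hjv]
    have hjm : j < define.length := by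
      apply hpre j hjn t ht (by omega)
      rw [List.getElem?_eq_getElem ht, List.getElem?_eq_getElem hjn]
      rw [← List.getD_eq_getElem word "" ht, ← List.getD_eq_getElem word "" hjn, hjv]
    rw [if_pos (by simp; omega)]
    have hget_j : PySem.List.pyGet? (St word define (t+1)) (j : Int) = some (pm word define (t+1) j) := by
      rw [PySem.List.pyGet?_natCast, St_getElem?, if_pos hjm, if_pos ⟨hjn, hLj⟩]
    have hget_t : PySem.List.pyGet? (St word define (t+1)) (t : Int) = some (define.getD t "") := by
      rw [PySem.List.pyGet?_natCast, St_getElem?, if_pos htm, if_neg (by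
        intro hc
        exact hL hc.2)]
    rw [hget_j, hget_t]
    simp only []
    rw [PySem.List.pySetD_natCast]
    apply List.ext_getElem?
    intro q
    rw [List.getElem?_set, length_St, St_getElem? word define t q,
        St_getElem? word define (t+1) q]
    by_cases hqj : j = q
    · subst hqj
      rw [if_pos rfl, if_pos hjm, if_pos hjm, if_pos ⟨hjn, hLj⟩]
      congr 1
      -- pm t j = pm (t+1) j ++ ", " ++ define[t]
      unfold pm
      rw [pvFilterSplit j t _ htj']
      have hQt : (word.getD t "" == word.getD j "") = true := by
        apply beq_iff_eq.mpr
        exact hjv.symm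
      rw [hQt]
      rw [if_pos rfl, List.reverse_append, List.reverse_cons, List.reverse_nil,
        List.nil_append, List.foldl_append, List.foldl_cons, List.foldl_nil]
    · rw [if_neg hqj]
      by_cases hqm : q < define.length
      · rw [if_pos hqm, if_pos hqm]
        congr 1
        split_ifs with hcond
        · unfold pm
          have hfe : (List.range q).filter
                (fun i => decide (t + 1 ≤ i) && (word.getD i "" == word.getD q ""))
              = (List.range q).filter
                (fun i => decide (t ≤ i) && (word.getD i "" == word.getD q "")) := by
            apply List.filter_congr
            intro i hi
            rw [List.mem_range] at hi
            by_cases hit : i = t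
            · subst hit
              have hQ : (word.getD i "" == word.getD q "") = false := by
                have : lastOcc? word (word.getD q "") = some q :=
                  (isL_iff_lastOcc word q hcond.1).mp hcond.2
                refine beq_eq_false_iff_ne.mpr (fun heq => ?_)
                rw [← heq, hj] at this
                exact hqj (Option.some_inj.mp this)
              rw [hQ, Bool.and_false, Bool.and_false]
            · rw [show (decide (t + 1 ≤ i) : Bool) = decide (t ≤ i) by
                by_cases hx : t ≤ i <;> by_cases hy : t + 1 ≤ i <;> simp [hx, hy] <;> omega]
          rw [hfe]
        · rfl
      · rw [if_neg hqm, if_neg hqm]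

-- the whole merge pass
theorem loop2_full (word define : List String) (hpre : Pre_optimize_list word define) :
    ∀ t, t ≤ word.length →
    (PySem.List.pyRange ((t : Int) - 1) (-1) (-1)).foldl (body2 word)
      (St word define t) = St word define 0 := by
  intro t
  induction t with
  | zero =>
    intro _
    rw [show ((0 : Nat) : Int) - 1 = -1 by norm_num,
      PySem.List.pyRange_neg_one_eq_nil le_rfl, List.foldl_nil]
  | succ t ih =>
    intro ht
    rw [show (((t + 1 : Nat)) : Int) - 1 = (t : Int) by push_cast; ring,
      PySem.List.pyRange_neg_one_cons (by omega), List.foldl_cons]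
    rw [loop2_step word define hpre t (by omega)]
    exact ih (by omega)
-- ---- the removal pass (loop 3) ----
def body3 (word : List String) (wd : List String × List String) (i : Int) :
    List String × List String :=
  match PySem.List.pyGet? wd.1 i with
  | none => wd
  | some w =>
    match PySem.Dict.get? (lastDict word) w with
    | none => wd
    | some j =>
      if j != i then
        match PySem.List.pop? wd.1 i with
        | none => wd
        | some pw =>
          match PySem.List.pop? wd.2 i with
          | none => wd
          | some pd => (pw.2, pd.2)
      else wd

-- the two lists after the removal pass has processed the indices ≥ t
def W3 (word : List String) (t : Nat) : List String :=
  word.take t ++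
    ((List.range word.length).filter (fun i => decide (t ≤ i) && isL word i)).map
      (fun i => word.getD i "")

def D3 (word define : List String) (t : Nat) : List String :=
  (St word define 0).take t
    ++ ((List.range word.length).filter
          (fun i => decide (t ≤ i) && (isL word i && decide (i < define.length)))).map
        (fun i => (St word define 0).getD i "")
    ++ (St word define 0).drop word.length

theorem W3_top (word : List String) : W3 word word.length = word := by
  unfold W3
  have hf : (List.range word.length).filter
      (fun i => decide (word.length ≤ i) && isL word i) = [] := by
    apply List.filter_eq_nil_iff.mpr
    intro i hi
    rw [List.mem_range] at hi
    have : ¬ (word.length ≤ i) := by omega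
    simp [this]
  rw [hf, List.map_nil, List.append_nil, List.take_of_length_le le_rfl]

theorem D3_top (word define : List String) : D3 word define word.length = St word define 0 := by
  unfold D3
  have hf : (List.range word.length).filter
      (fun i => decide (word.length ≤ i) && (isL word i && decide (i < define.length))) = [] := by
    apply List.filter_eq_nil_iff.mpr
    intro i hi
    rw [List.mem_range] at hi
    have : ¬ (word.length ≤ i) := by omega
    simp [this]
  rw [hf, List.map_nil, List.append_nil, List.take_append_drop]

theorem getD_St0 (word define : List String) (q : Nat) (hq : q < define.length)
    (hqn : q < word.length) (hL : isL word q = true) :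
    (St word define 0).getD q "" = mrg word define q := by
  rw [List.getD_eq_getElem?_getD, St_getElem? word define 0 q, if_pos hq, if_pos ⟨hqn, hL⟩,
    Option.getD_some, mrg_eq_pm]

theorem St0_drop (word define : List String) :
    (St word define 0).drop word.length = define.drop word.length := by
  apply List.ext_getElem?
  intro i
  rw [List.getElem?_drop, List.getElem?_drop, St_getElem? word define 0]
  by_cases h : word.length + i < define.length
  · rw [if_pos h, if_neg (by omega), List.getElem?_eq_getElem h,
      List.getD_eq_getElem define "" h]
  · rw [if_neg h, List.getElem?_eq_none (by omega)]

theorem W3_zero (word : List String) : W3 word 0 = Gw word := by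
  unfold W3 Gw keepIdx
  rw [List.take_zero, List.nil_append]
  have hfe : (List.range word.length).filter (fun i => decide (0 ≤ i) && isL word i)
      = (List.range word.length).filter (isL word) := by
    apply List.filter_congr
    intro i _
    simp
  rw [hfe]

theorem D3_zero (word define : List String) (hpre : Pre_optimize_list word define) :
    D3 word define 0 = Gd word define := by
  unfold D3 Gd keepIdx
  rw [List.take_zero, List.nil_append, St0_drop]
  congr 1
  rw [List.filter_filter]
  have hf : (List.range word.length).filter
        (fun i => decide (0 ≤ i) && (isL word i && decide (i < define.length)))
      = (List.range word.length).filter (fun i => decide (i < define.length) && isL word i) := by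
    apply List.filter_congr
    intro i _
    cases h1 : isL word i <;> cases h2 : (decide (i < define.length) : Bool) <;> simp [h1, h2]
  rw [hf]
  apply List.map_congr_left
  intro q hq
  rw [List.mem_filter, List.mem_range] at hq
  have h2 := hq.2
  rw [Bool.and_eq_true] at h2
  exact getD_St0 word define q (of_decide_eq_true h2.1) hq.1 h2.2

theorem length_W3_ge (word : List String) (t : Nat) (ht : t ≤ word.length) :
    t ≤ (W3 word t).length := by
  unfold W3
  rw [List.length_append, List.length_take]
  omega

theorem length_D3_ge (word define : List String) (t : Nat) (ht : t ≤ define.length) :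
    t ≤ (D3 word define t).length := by
  unfold D3
  rw [List.length_append, List.length_append, List.length_take, length_St]
  omega

-- one step of the removal pass
theorem loop3_step (word define : List String) (hpre : Pre_optimize_list word define)
    (t : Nat) (ht : t < word.length) :
    body3 word (W3 word (t + 1), D3 word define (t + 1)) (t : Int)
      = (W3 word t, D3 word define t) := by
  unfold body3
  have htake : word.take (t + 1) = word.take t ++ [word.getD t ""] := by
    rw [List.take_add_one, List.getElem?_eq_getElem ht, List.getD_eq_getElem _ _ ht]
    rfl
  have hW1 : PySem.List.pyGet? (W3 word (t+1)) (t : Int) = some (word.getD t "") := by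
    rw [PySem.List.pyGet?_natCast]
    unfold W3
    rw [List.getElem?_append_left (by rw [List.length_take]; omega),
      List.getElem?_take_of_lt (by omega), List.getElem?_eq_getElem ht,
      List.getD_eq_getElem _ _ ht]
  rw [hW1]
  simp only []
  obtain ⟨j, hj, htj, hjn, hjv, hmax⟩ := lastOcc_spec word t ht
  have hdict : PySem.Dict.get? (lastDict word) (word.getD t "") = some (j : Int) := by
    rw [lastDict_get?, hj]; rfl
  rw [hdict]
  simp only []
  by_cases hL : isL word t = true
  · have hjt : j = t := by
      have := (isL_iff_lastOcc word t ht).mp hL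
      rw [hj] at this
      exact Option.some_inj.mp this
    subst hjt
    rw [if_neg (by simp)]
    have hW : W3 word (j + 1) = W3 word j := by
      unfold W3
      rw [pvFilterSplit word.length j _ ht, hL, if_pos rfl, List.map_append, htake]
      simp [List.append_assoc]
    have hD : D3 word define (j + 1) = D3 word define j := by
      unfold D3
      rw [pvFilterSplit word.length j (fun i => isL word i && decide (i < define.length)) ht]
      by_cases hm : j < define.length
      · rw [hL]
        simp only [Bool.true_and, decide_eq_true_eq, if_pos hm, List.map_append]
        have hTake : (St word define 0).take (j + 1)
            = (St word define 0).take j ++ [(St word define 0).getD j ""] := by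
          rw [List.take_add_one, List.getElem?_eq_getElem (by rw [length_St]; omega),
            List.getD_eq_getElem _ "" (by rw [length_St]; omega)]
          rfl
        rw [hTake]
        simp [List.append_assoc]
      · rw [show (isL word j && decide (j < define.length)) = false by
          simp [hm]]
        rw [if_neg (by simp)]
        rw [List.take_of_length_le (by rw [length_St]; omega),
          List.take_of_length_le (by rw [length_St]; omega)]
        simp
    rw [hW, hD]
  · -- duplicate: pop index t from both lists
    have hjt : j ≠ t := by
      intro e
      exact hL ((isL_iff_lastOcc word t ht).mpr (by rw [hj, e]))
    have htj' : t < j := by omega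
    have htm : t < define.length := by
      apply hpre t ht j hjn (by omega)
      rw [List.getElem?_eq_getElem ht, List.getElem?_eq_getElem hjn]
      rw [← List.getD_eq_getElem word "" ht, ← List.getD_eq_getElem word "" hjn, hjv]
    have hLf : isL word t = false := eq_false_of_ne_true hL
    have hWlen : t < (W3 word (t+1)).length := by
      have := length_W3_ge word (t+1) (by omega); omega
    have hDlen : t < (D3 word define (t+1)).length := by
      have := length_D3_ge word define (t+1) (by omega); omega
    have hWerase : (W3 word (t+1)).eraseIdx t = W3 word t := by
      unfold W3
      rw [htake, List.append_assoc, List.singleton_append]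
      rw [pvEraseFront _ _ _ t (by rw [List.length_take]; omega)]
      rw [pvFilterShift word.length t _ (by rw [hLf])]
    have hDerase : (D3 word define (t+1)).eraseIdx t = D3 word define t := by
      unfold D3
      have hTake : (St word define 0).take (t + 1)
          = (St word define 0).take t ++ [(St word define 0).getD t ""] := by
        rw [List.take_add_one, List.getElem?_eq_getElem (by rw [length_St]; omega),
          List.getD_eq_getElem _ "" (by rw [length_St]; omega)]
        rfl
      rw [hTake, List.append_assoc, List.append_assoc, List.singleton_append]
      rw [pvEraseFront _ _ _ t (by rw [List.length_take, length_St]; omega)]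
      rw [pvFilterShift word.length t _ (by rw [hLf, Bool.false_and])]
      rw [List.append_assoc]
    rw [if_pos (by simp; omega), PySem.List.pop?_natCast _ t hWlen,
      PySem.List.pop?_natCast _ t hDlen, hWerase, hDerase]
theorem loop3_full (word define : List String) (hpre : Pre_optimize_list word define) :
    ∀ t, t ≤ word.length →
    (PySem.List.pyRange ((t : Int) - 1) (-1) (-1)).foldl (body3 word)
      (W3 word t, D3 word define t) = (W3 word 0, D3 word define 0) := by
  intro t
  induction t with
  | zero =>
    intro _
    rw [show ((0 : Nat) : Int) - 1 = -1 by norm_num,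
      PySem.List.pyRange_neg_one_eq_nil le_rfl, List.foldl_nil]
  | succ t ih =>
    intro ht
    rw [show (((t + 1 : Nat)) : Int) - 1 = (t : Int) by push_cast; ring,
      PySem.List.pyRange_neg_one_cons (by omega), List.foldl_cons]
    rw [loop3_step word define hpre t (by omega)]
    exact ih (by omega)

theorem alt_eq_Gg (word define : List String) (hpre : Pre_optimize_list word define) :
    optimize_list_alt word define = Gg word define := by
  have hb2 : (fun df (i : Int) =>
      match PySem.List.pyGet? word i with
      | none => df
      | some w =>
        match PySem.Dict.get? (lastDict word) w with
        | none => df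
        | some j =>
          if j != i then
            match PySem.List.pyGet? df j with
            | none => df
            | some dj =>
              match PySem.List.pyGet? df i with
              | none => df
              | some di => PySem.List.pySetD df j (dj ++ ", " ++ di)
          else df) = body2 word := rfl
  have hb3 : (fun (wd : List String × List String) (i : Int) =>
      match PySem.List.pyGet? wd.1 i with
      | none => wd
      | some w =>
        match PySem.Dict.get? (lastDict word) w with
        | none => wd
        | some j =>
          if j != i then
            match PySem.List.pop? wd.1 i with
            | none => wd
            | some pw =>
              match PySem.List.pop? wd.2 i with
              | none => wd
              | some pd => (pw.2, pd.2)
          else wd) = body3 word := rfl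
  have h2 : (PySem.List.pyRange ((word.length : Int) - 1) (-1) (-1)).foldl (body2 word) define
      = St word define 0 := by
    have := loop2_full word define hpre word.length le_rfl
    rwa [St_top] at this
  have h3 : (PySem.List.pyRange ((word.length : Int) - 1) (-1) (-1)).foldl (body3 word)
      (word, St word define 0) = (W3 word 0, D3 word define 0) := by
    have := loop3_full word define hpre word.length le_rfl
    rwa [W3_top, D3_top] at this
  simp only [optimize_list_alt]
  rw [hb2, hb3, h2, h3, W3_zero, D3_zero word define hpre]
  rfl

-- reused index arithmetic
theorem pvDrop_eraseIdx {α : Type} (l : List α) (s k : Nat) (hs : s < k) :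
    (l.eraseIdx s).drop (k - 1) = l.drop k := by
  apply List.ext_getElem?
  intro i
  rw [List.getElem?_drop, List.getElem?_drop, pvGetElem?_eraseIdx]
  have : ¬ (k - 1 + i < s) := by omega
  rw [if_neg this]
  congr 1
  omega

theorem pvDrop_set {α : Type} (l : List α) (m k : Nat) (hm : m < k) (y : α) :
    (l.set m y).drop k = l.drop k := List.drop_set_of_lt hm

theorem pvFoldlCongr {α : Type} (l : List Nat) (f g : α → Nat → α) (init : α)
    (h : ∀ a i, i ∈ l → f a i = g a i) : l.foldl f init = l.foldl g init := by
  induction l generalizing init with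
  | nil => rfl
  | cons x xs ih =>
    rw [List.foldl_cons, List.foldl_cons, h init x (by simp)]
    exact ih _ (fun a i hi => h a i (by simp [hi]))

theorem pvRangeSplit3 (a b : Nat) (h : a < b) :
    List.range b = (List.range a ++ [a]) ++ (List.range (b - a - 1)).map (fun k => (a + 1) + k) := by
  rw [← List.range_succ, ← List.range_add]
  congr 1
  omega

-- getD across an eraseIdx at S, stated through the reindexing map
theorem pvGetD_word' (word : List String) (S p : Nat) :
    (word.eraseIdx S).getD p "" = if p < S then word.getD p "" else word.getD (p + 1) "" :=
  pvGetD_eraseIdx word S p ""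

-- isL transfer: erasing the occurrence S of word[M] (S < M, word[S] = word[M]) does not
-- change which positions are last occurrences, up to reindexing
theorem isL_eraseIdx (word : List String) (S M : Nat) (hSM : S < M) (hMn : M < word.length)
    (hv : word.getD S "" = word.getD M "") (p : Nat) (hp : p < word.length - 1) :
    isL (word.eraseIdx S) p = isL word (if p < S then p else p + 1) := by
  have hlen : (word.eraseIdx S).length = word.length - 1 := by
    rw [List.length_eraseIdx_of_lt (by omega)]
  have hgp : (word.eraseIdx S).getD p "" = word.getD (if p < S then p else p + 1) "" := by
    rw [pvGetD_word']
    split_ifs <;> rfl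
  unfold isL
  apply decide_eq_decide.mpr
  constructor
  · intro hall k hkn hqk heq
    by_cases hkS : k = S
    · -- k = S: then M - 1 witnesses the same value in the erased list
      rw [hkS] at hqk heq
      have hpS : p < S := by split_ifs at hqk <;> omega
      rw [if_pos hpS] at heq
      have h1 : (word.eraseIdx S).getD (M - 1) "" = word.getD M "" := by
        rw [pvGetD_word', if_neg (by omega)]
        congr 1
        omega
      refine hall (M - 1) (by omega) (by omega) ?_
      rw [h1, hgp, if_pos hpS, ← hv]
      exact heq
    · by_cases hks : k < S
      · refine hall k (by omega) (by split_ifs at hqk <;> omega) ?_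
        have h1 : (word.eraseIdx S).getD k "" = word.getD k "" := by
          rw [pvGetD_word', if_pos hks]
        rw [h1, hgp]
        exact heq
      · refine hall (k - 1) (by omega) (by split_ifs at hqk <;> omega) ?_
        have h1 : (word.eraseIdx S).getD (k - 1) "" = word.getD k "" := by
          rw [pvGetD_word', if_neg (by omega)]
          congr 1
          omega
        rw [h1, hgp]
        exact heq
  · intro hall k hkn hqk heq
    by_cases hks : k < S
    · have hpS : p < S := by omega
      have h1 : (word.eraseIdx S).getD k "" = word.getD k "" := by
        rw [pvGetD_word', if_pos hks]
      rw [h1, hgp] at heq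
      refine hall k (by omega) (by rw [if_pos hpS]; omega) heq
    · have h1 : (word.eraseIdx S).getD k "" = word.getD (k + 1) "" := by
      
        rw [pvGetD_word', if_neg hks]
      rw [h1, hgp] at heq
      refine hall (k + 1) (by omega) (by split_ifs <;> omega) heq
theorem isL_S_false (word : List String) (S M : Nat) (hSM : S < M) (hMn : M < word.length)
    (hv : word.getD S "" = word.getD M "") : isL word S = false := by
  unfold isL
  apply decide_eq_false
  intro hP
  exact (hP M hMn hSM) hv.symm

theorem keepIdx_eraseIdx (word : List String) (S M : Nat) (hSM : S < M) (hMn : M < word.length)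
    (hv : word.getD S "" = word.getD M "") :
    keepIdx (word.eraseIdx S) = (keepIdx word).map (fun q => if q < S then q else q - 1) := by
  have hlen : (word.eraseIdx S).length = word.length - 1 := by
    rw [List.length_eraseIdx_of_lt (by omega)]
  unfold keepIdx
  rw [hlen]
  -- left side: split range (n-1) at S
  rw [show List.range (word.length - 1)
      = List.range S ++ (List.range (word.length - 1 - S)).map (fun k => S + k) by
    rw [← List.range_add]; congr 1; omega]
  rw [List.filter_append, List.filter_map]
  -- right side: split range n at S (with the singleton [S])
  rw [pvRangeSplit3 S word.length (by omega), List.filter_append, List.filter_append,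
    List.filter_map]
  have hS0 : List.filter (isL word) [S] = [] := by
    rw [List.filter_cons, isL_S_false word S M hSM hMn hv]
    rfl
  rw [hS0, List.append_nil, List.map_append, List.map_map]
  congr 1
  · -- prefix: isL word' p = isL word p for p < S, and ρ is the identity there
    have h1 : List.filter (isL (word.eraseIdx S)) (List.range S)
        = List.filter (isL word) (List.range S) := by
      apply List.filter_congr
      intro p hp
      rw [List.mem_range] at hp
      rw [isL_eraseIdx word S M hSM hMn hv p (by omega), if_pos (by omega)]
    rw [h1]
    symm
    have h2 : ∀ q ∈ List.filter (isL word) (List.range S),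
        (fun q => if q < S then q else q - 1) q = id q := by
      intro q hq
      rw [List.mem_filter, List.mem_range] at hq
      simp only [id]
      rw [if_pos hq.1]
    rw [List.map_congr_left h2, List.map_id]
  · -- suffix: positions S + k of the erased list are positions S + 1 + k of word
    have h1 : List.filter (isL (word.eraseIdx S) ∘ fun k => S + k) (List.range (word.length - 1 - S))
        = List.filter (fun k => isL word (S + 1 + k)) (List.range (word.length - 1 - S)) := by
      apply List.filter_congr
      intro k hk
      rw [List.mem_range] at hk
      show isL (word.eraseIdx S) (S + k) = _
      rw [isL_eraseIdx word S M hSM hMn hv (S + k) (by omega), if_neg (by omega)]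
      exact congrArg (isL word) (by omega)
    rw [h1]
    have h2 : List.filter (isL word ∘ fun k => S + 1 + k) (List.range (word.length - S - 1))
        = List.filter (fun k => isL word (S + 1 + k)) (List.range (word.length - S - 1)) := by
      apply List.filter_congr
      intro k _
      rfl
    rw [h2]
    rw [show word.length - S - 1 = word.length - 1 - S by omega]
    apply List.map_congr_left
    intro k _
    show S + k = if S + 1 + k < S then S + 1 + k else S + 1 + k - 1
    rw [if_neg (by omega)]
    omega

theorem Gw_eraseIdx (word : List String) (S M : Nat) (hSM : S < M) (hMn : M < word.length)
    (hv : word.getD S "" = word.getD M "") :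
    Gw (word.eraseIdx S) = Gw word := by
  unfold Gw
  rw [keepIdx_eraseIdx word S M hSM hMn hv, List.map_map]
  apply List.map_congr_left
  intro q hq
  unfold keepIdx at hq
  rw [List.mem_filter, List.mem_range] at hq
  have hqS : q ≠ S := by
    intro e
    rw [e, isL_S_false word S M hSM hMn hv] at hq
    exact absurd hq.2 (by simp)
  show (word.eraseIdx S).getD (if q < S then q else q - 1) "" = word.getD q ""
  by_cases h : q < S
  · rw [if_pos h, pvGetD_word', if_pos h]
  · rw [if_neg h, pvGetD_word', if_neg (by omega)]
    congr 1
    omega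
-- the merged definition at a kept position is unchanged by A's one merge step
theorem mrg_eraseIdx (word define : List String) (S M : Nat)
    (hSM : S < M) (hMn : M < word.length) (hMm : M < define.length)
    (hv : word.getD S "" = word.getD M "")
    (hgap : ∀ k, S < k → k < M → word.getD k "" ≠ word.getD M "")
    (hlast : ∀ k, M < k → k < word.length → word.getD k "" ≠ word.getD M "")
    (q : Nat) (hqn : q < word.length) (hqL : isL word q = true) :
    mrg (word.eraseIdx S)
        ((define.set M (define.getD M "" ++ ", " ++ define.getD S "")).eraseIdx S)
        (if q < S then q else q - 1)
      = mrg word define q := by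
  set x := define.getD M "" ++ ", " ++ define.getD S "" with hx
  set define' := (define.set M x).eraseIdx S with hdef'
  have hD'lo : ∀ i, i < S → define'.getD i "" = define.getD i "" := by
    intro i hi
    rw [hdef', pvGetD_eraseIdx, if_pos hi, pvGetD_set _ _ _ _ _ hMm, if_neg (by omega)]
  have hD'hi : ∀ i, S ≤ i → i + 1 ≠ M → define'.getD i "" = define.getD (i + 1) "" := by
    intro i hi hiM
    rw [hdef', pvGetD_eraseIdx, if_neg (by omega), pvGetD_set _ _ _ _ _ hMm, if_neg hiM]
  have hD'M : define'.getD (M - 1) "" = x := by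
    rw [hdef', pvGetD_eraseIdx, if_neg (by omega), pvGetD_set _ _ _ _ _ hMm,
      if_pos (by omega)]
  have hW'lo : ∀ i, i < S → (word.eraseIdx S).getD i "" = word.getD i "" := by
    intro i hi
    rw [pvGetD_word', if_pos hi]
  have hW'hi : ∀ i, S ≤ i → (word.eraseIdx S).getD i "" = word.getD (i + 1) "" := by
    intro i hi
    rw [pvGetD_word', if_neg (by omega)]
  by_cases hqM : q = M
  · -- q = M: the left fold starts from the already-merged string x
    rw [hqM, if_neg (by omega)]
    unfold mrg
    have hgM : (word.eraseIdx S).getD (M - 1) "" = word.getD M "" := by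
      rw [hW'hi (M - 1) (by omega)]
      congr 1
      omega
    -- occurrences of word[M] below M: exactly those below S, and S itself
    have hE : (List.range M).filter (fun i => word.getD i "" == word.getD M "")
        = (List.range S).filter (fun i => word.getD i "" == word.getD M "") ++ [S] := by
      rw [pvRangeSplit3 S M hSM, List.filter_append, List.filter_append, List.filter_map]
      have h1 : List.filter (fun i => word.getD i "" == word.getD M "") [S] = [S] := by
        rw [List.filter_cons, if_pos (by exact beq_iff_eq.mpr hv)]
        rfl
      have h2 : List.filter ((fun i => word.getD i "" == word.getD M "") ∘ fun k => S + 1 + k)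
          (List.range (M - S - 1)) = [] := by
        apply List.filter_eq_nil_iff.mpr
        intro k hk
        rw [List.mem_range] at hk
        show ¬ (word.getD (S + 1 + k) "" == word.getD M "") = true
        rw [beq_iff_eq]
        exact hgap (S + 1 + k) (by omega) (by omega)
      rw [h1, h2, List.map_nil, List.append_nil]
    have hE' : (List.range (M - 1)).filter
          (fun i => (word.eraseIdx S).getD i "" == (word.eraseIdx S).getD (M - 1) "")
        = (List.range S).filter (fun i => word.getD i "" == word.getD M "") := by
      rw [show List.range (M - 1) = List.range S ++ (List.range (M - 1 - S)).map (fun k => S + k) by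
          rw [← List.range_add]; congr 1; omega,
        List.filter_append, List.filter_map]
      have h1 : List.filter (fun i => (word.eraseIdx S).getD i "" == (word.eraseIdx S).getD (M - 1) "")
          (List.range S) = List.filter (fun i => word.getD i "" == word.getD M "") (List.range S) := by
        apply List.filter_congr
        intro i hi
        rw [List.mem_range] at hi
        rw [hgM, hW'lo i hi]
      have h2 : List.filter ((fun i => (word.eraseIdx S).getD i "" == (word.eraseIdx S).getD (M - 1) "")
            ∘ fun k => S + k) (List.range (M - 1 - S)) = [] := by
        apply List.filter_eq_nil_iff.mpr
        intro k hk
        rw [List.mem_range] at hk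
        show ¬ ((word.eraseIdx S).getD (S + k) "" == (word.eraseIdx S).getD (M - 1) "") = true
        rw [hgM, hW'hi (S + k) (by omega), beq_iff_eq]
        exact hgap (S + k + 1) (by omega) (by omega)
      rw [h1, h2, List.map_nil, List.append_nil]
    rw [hE, hE', List.reverse_append]
    simp only [List.reverse_cons, List.reverse_nil, List.nil_append, List.singleton_append,
      List.foldl_cons]
    rw [hD'M, hx]
    apply pvFoldlCongr
    intro a i hi
    rw [List.mem_reverse, List.mem_filter, List.mem_range] at hi
    rw [hD'lo i hi.1]
  · -- q ≠ M: a kept position of a different word; its occurrence set avoids S and M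
    have hqv : word.getD q "" ≠ word.getD M "" := by
      intro heq
      by_cases hqM2 : q < M
      · exact of_decide_eq_true hqL M hMn hqM2 heq.symm
      · exact hlast q (by omega) hqn heq
    by_cases hqS : q < S
    · -- everything below S is untouched
      rw [if_pos hqS]
      unfold mrg
      have hgq : (word.eraseIdx S).getD q "" = word.getD q "" := hW'lo q hqS
      have hE : (List.range q).filter
            (fun i => (word.eraseIdx S).getD i "" == (word.eraseIdx S).getD q "")
          = (List.range q).filter (fun i => word.getD i "" == word.getD q "") := by
        apply List.filter_congr
        intro i hi
        rw [List.mem_range] at hi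
        rw [hgq, hW'lo i (by omega)]
      rw [hE, hD'lo q hqS]
      apply pvFoldlCongr
      intro a i hi
      rw [List.mem_reverse, List.mem_filter, List.mem_range] at hi
      rw [hD'lo i (by omega)]
    · -- q > S: reindex the occurrences above S
      have hqS0 : q ≠ S := by
        intro e
        rw [e, isL_S_false word S M hSM hMn hv] at hqL
        exact absurd hqL (by simp)
      have hqS' : S < q := by omega
      rw [if_neg hqS]
      unfold mrg
      have hgq : (word.eraseIdx S).getD (q - 1) "" = word.getD q "" := by
        rw [hW'hi (q - 1) (by omega)]
        congr 1
        omega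
      have hE : (List.range q).filter (fun i => word.getD i "" == word.getD q "")
          = (List.range S).filter (fun i => word.getD i "" == word.getD q "")
            ++ ((List.range (q - S - 1)).filter (fun k => word.getD (S + 1 + k) "" == word.getD q "")).map
                (fun k => S + 1 + k) := by
        rw [pvRangeSplit3 S q hqS', List.filter_append, List.filter_append, List.filter_map]
        have h1 : List.filter (fun i => word.getD i "" == word.getD q "") [S] = [] := by
          rw [List.filter_cons]
          rw [if_neg (by
            rw [beq_iff_eq]
            intro heq
            exact hqv (by rw [← heq, hv]))]
          rfl
        rw [h1, List.append_nil]
        rfl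
      have hE' : (List.range (q - 1)).filter
            (fun i => (word.eraseIdx S).getD i "" == (word.eraseIdx S).getD (q - 1) "")
          = (List.range S).filter (fun i => word.getD i "" == word.getD q "")
            ++ ((List.range (q - S - 1)).filter (fun k => word.getD (S + 1 + k) "" == word.getD q "")).map
                (fun k => S + k) := by
        rw [show List.range (q - 1) = List.range S ++ (List.range (q - 1 - S)).map (fun k => S + k) by
            rw [← List.range_add]; congr 1; omega,
          List.filter_append, List.filter_map]
        congr 1
        · apply List.filter_congr
          intro i hi
          rw [List.mem_range] at hi
          rw [hgq, hW'lo i hi]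
        · rw [show q - 1 - S = q - S - 1 by omega]
          congr 1
          apply List.filter_congr
          intro k hk
          rw [List.mem_range] at hk
          show ((word.eraseIdx S).getD (S + k) "" == (word.eraseIdx S).getD (q - 1) "") = _
          rw [hgq, hW'hi (S + k) (by omega)]
          exact congrArg (fun z => (word.getD z "" == word.getD q "")) (by omega)
      rw [hE, hE', hD'hi (q - 1) (by omega) (by intro e; exact hqM (by omega)),
        show q - 1 + 1 = q by omega, List.reverse_append, List.reverse_append,
        List.foldl_append, List.foldl_append]
      have hinner : ∀ (init : String),
          (((List.range (q - S - 1)).filter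
              (fun k => word.getD (S + 1 + k) "" == word.getD q "")).map (fun k => S + k)).reverse.foldl
            (fun s i => s ++ ", " ++ define'.getD i "") init
          = (((List.range (q - S - 1)).filter
              (fun k => word.getD (S + 1 + k) "" == word.getD q "")).map (fun k => S + 1 + k)).reverse.foldl
            (fun s i => s ++ ", " ++ define.getD i "") init := by
        intro init
        rw [← List.map_reverse, ← List.map_reverse, List.foldl_map, List.foldl_map]
        apply pvFoldlCongr
        intro a k hk
        rw [List.mem_reverse, List.mem_filter, List.mem_range] at hk
        have hne : S + k + 1 ≠ M := by
          intro e
          apply hqv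
          rw [← beq_iff_eq.mp hk.2]
          exact congrArg (fun z => word.getD z "") (by omega)
        rw [hD'hi (S + k) (by omega) hne]
        exact congrArg (fun z => a ++ ", " ++ define.getD z "") (by omega)
      rw [hinner]
      apply pvFoldlCongr
      intro a i hi
      rw [List.mem_reverse, List.mem_filter, List.mem_range] at hi
      rw [hD'lo i (by omega)]
theorem Gg_surgery (word define : List String) (S M : Nat)
    (hSM : S < M) (hMn : M < word.length) (hSm : S < define.length) (hMm : M < define.length)
    (hv : word.getD S "" = word.getD M "")
    (hgap : ∀ k, S < k → k < M → word.getD k "" ≠ word.getD M "")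
    (hlast : ∀ k, M < k → k < word.length → word.getD k "" ≠ word.getD M "") :
    Gg word define
      = Gg (word.eraseIdx S)
          ((define.set M (define.getD M "" ++ ", " ++ define.getD S "")).eraseIdx S) := by
  set x := define.getD M "" ++ ", " ++ define.getD S "" with hx
  have hlw : (word.eraseIdx S).length = word.length - 1 :=
    List.length_eraseIdx_of_lt (by omega)
  have hld : ((define.set M x).eraseIdx S).length = define.length - 1 := by
    rw [List.length_eraseIdx_of_lt (by rw [List.length_set]; omega), List.length_set]
  unfold Gg
  congr 1
  · exact (Gw_eraseIdx word S M hSM hMn hv).symm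
  congr 1
  unfold Gd
  rw [hlw, hld]
  -- the untouched tail beyond word's length
  have hdrop : ((define.set M x).eraseIdx S).drop (word.length - 1) = define.drop word.length := by
    rw [pvDrop_eraseIdx _ S word.length (by omega), pvDrop_set _ M word.length (by omega)]
  rw [hdrop]
  congr 1
  rw [keepIdx_eraseIdx word S M hSM hMn hv, List.filter_map, List.map_map]
  have hfe : (keepIdx word).filter
        ((fun i => decide (i < define.length - 1)) ∘ fun q => if q < S then q else q - 1)
      = (keepIdx word).filter (fun i => decide (i < define.length)) := by
    apply List.filter_congr
    intro q hq
    unfold keepIdx at hq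
    rw [List.mem_filter, List.mem_range] at hq
    show decide ((if q < S then q else q - 1) < define.length - 1) = decide (q < define.length)
    have hqS : q ≠ S := by
      intro e
      rw [e, isL_S_false word S M hSM hMn hv] at hq
      exact absurd hq.2 (by simp)
    by_cases h : q < S
    · rw [if_pos h]
      have h1 : q < define.length - 1 := by omega
      have h2 : q < define.length := by omega
      rw [decide_eq_true h1, decide_eq_true h2]
    · rw [if_neg h]
      exact decide_eq_decide.mpr (by omega)
  rw [hfe]
  symm
  apply List.map_congr_left
  intro q hq
  rw [List.mem_filter] at hq
  have hq1 := hq.1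
  unfold keepIdx at hq1
  rw [List.mem_filter, List.mem_range] at hq1
  show mrg (word.eraseIdx S) ((define.set M x).eraseIdx S) (if q < S then q else q - 1)
      = mrg word define q
  rw [hx]
  exact mrg_eraseIdx word define S M hSM hMn hMm hv hgap hlast q hq1.1 hq1.2

theorem getD_eq_of_getElem? (word : List String) (i j : Nat) (hi : i < word.length)
    (hj : j < word.length) (h : word[i]? = word[j]?) : word.getD i "" = word.getD j "" := by
  rw [List.getElem?_eq_getElem hi, List.getElem?_eq_getElem hj] at h
  rw [List.getD_eq_getElem _ _ hi, List.getD_eq_getElem _ _ hj]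
  exact Option.some_inj.mp h

theorem getElem?_eq_of_getD (word : List String) (i j : Nat) (hi : i < word.length)
    (hj : j < word.length) (h : word.getD i "" = word.getD j "") : word[i]? = word[j]? := by
  rw [List.getElem?_eq_getElem hi, List.getElem?_eq_getElem hj]
  rw [List.getD_eq_getElem _ _ hi, List.getD_eq_getElem _ _ hj] at h
  exact congrArg some h

-- ---- A = Gg ----
theorem Gg_step (word define : List String) (hd : dupsP word ≠ [])
    (hpre : Pre_optimize_list word define) :
    Gg word define =
      Gg (word.eraseIdx (SiP word))
        ((define.set (MiP word)
            (define.getD (MiP word) "" ++ ", " ++ define.getD (SiP word) "")).eraseIdx (SiP word)) := by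
  have hMn : MiP word < word.length := (Mi_facts word hd).1
  have hS := (Si_facts word hd).1
  rw [cnd_mem_iff] at hS
  obtain ⟨hSn, hMS, hw⟩ := hS
  obtain ⟨hMm, hSm⟩ := Mi_lt_define word define hd hpre
  have hSM : SiP word < MiP word := Si_lt_Mi word hd
  have hv : word.getD (SiP word) "" = word.getD (MiP word) "" :=
    getD_eq_of_getElem? word _ _ hSn hMn hw.symm
  have hgap : ∀ k, SiP word < k → k < MiP word → word.getD k "" ≠ word.getD (MiP word) "" := by
    intro k h1 h2 heq
    have hk : k ∈ candsP word (MiP word) := by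
      rw [cnd_mem_iff]
      exact ⟨by omega, by omega, getElem?_eq_of_getD word _ _ hMn (by omega) heq.symm⟩
    have := (Si_facts word hd).2 k hk
    omega
  have hlast : ∀ k, MiP word < k → k < word.length → word.getD k "" ≠ word.getD (MiP word) "" := by
    intro k h1 h2 heq
    have hMk : MiP word ∈ candsP word k := by
      rw [cnd_mem_iff]
      exact ⟨hMn, by omega, getElem?_eq_of_getD word _ _ h2 hMn heq⟩
    have hemp := (Mi_facts word hd).2.2 k h1 h2
    rw [List.isEmpty_iff] at hemp
    rw [hemp] at hMk
    simp at hMk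
  exact Gg_surgery word define (SiP word) (MiP word) hSM hMn hSm hMm hv hgap hlast

theorem loopA_eq_Gg : ∀ (N : Nat) (word define : List String), word.length ≤ N →
    Pre_optimize_list word define → optimize_list word define = Gg word define := by
  intro N
  induction N with
  | zero =>
    intro word define hlen hpre
    have hw0 : word = [] := List.eq_nil_of_length_eq_zero (by omega)
    subst hw0
    rw [optimize_list, scanA_eq]
    have hd0 : dupsP ([] : List String) = [] := rfl
    rw [hd0]
    simp only [List.isEmpty_nil, if_true]
    rw [if_neg (by decide)]
    rw [Gg_nodup _ _ (by simp)]
  | succ N ih =>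
    intro word define hlen hpre
    rw [optimize_list, scanA_eq]
    by_cases hd : (dupsP word).isEmpty
    · rw [if_pos hd]
      rw [if_neg (by decide)]
      rw [Gg_nodup _ _ (dups_empty_nodup word (List.isEmpty_iff.mp hd))]
    · rw [if_neg hd]
      have hdne : dupsP word ≠ [] := by
        intro h0
        rw [h0] at hd
        simp at hd
      have hMn : MiP word < word.length := (Mi_facts word hdne).1
      have hS := (Si_facts word hdne).1
      rw [cnd_mem_iff] at hS
      obtain ⟨hSn, hMS, hww⟩ := hS
      obtain ⟨hMm, hSm⟩ := Mi_lt_define word define hdne hpre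
      have hSM : SiP word < MiP word := Si_lt_Mi word hdne
      have hcond : ((((MiP word : Int)) != -1) && (((SiP word : Int)) != -1)) = true := by
        simp only [bne_iff_ne, Bool.and_eq_true, ne_eq]
        constructor <;> omega
      rw [if_pos hcond]
      rw [PySem.List.pyGet?_natCast define (MiP word), PySem.List.pyGet?_natCast define (SiP word)]
      rw [List.getElem?_eq_getElem hMm, List.getElem?_eq_getElem hSm]
      simp only []
      rw [PySem.List.pySetD_natCast]
      rw [PySem.List.pop?_natCast _ (SiP word) (by simp [List.length_set]; omega)]
      rw [PySem.List.pop?_natCast word (SiP word) hSn]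
      simp only []
      have hgd : (define[MiP word]'hMm ++ ", " ++ define[SiP word]'hSm)
          = define.getD (MiP word) "" ++ ", " ++ define.getD (SiP word) "" := by
        rw [List.getD_eq_getElem define "" hMm, List.getD_eq_getElem define "" hSm]
      rw [hgd]
      rw [ih _ _ (by
          rw [List.length_eraseIdx]
          simp [hSn]
          omega) (pre_preserved word define hdne hpre)]
      exact (Gg_step word define hdne hpre).symm

-- ===== VERDICT (by name: the statement is the Claim_ definition above) =====
theorem optimize_list_spec : Claim_equal_optimize_list := by
  intro word define _ hpre
  unfold Spec_optimize_list
  rw [loopA_eq_Gg word.length word define le_rfl hpre, alt_eq_Gg word define hpre]
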